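-- pv_equiv track=rewrite | github.com/xq25478/Master_Job | 算法与数据结构/LeetCode/递归(Recursion)/LCP 20. 快速公交.py | busRapidTransit
-- ===== SOURCE A (Python) =====
-- def busRapidTransit(target, inc, dec, jump, cost):
--     """
--     :type target: int
--     :type inc: int
--     :type dec: int
--     :type jump: List[int]
--     :type cost: List[int]
--     :rtype: int
--     """
--     #自底向上记忆化递推
--     memo = dict() #记忆字典
--     def findroute(cur_target):
--         if cur_target==0:     #当前站点已经是0了返回0代价
--             return 0
--         if cur_target in memo:
--             return memo[cur_target]
--         mincost = cur_target*inc  #最小代价初始化为直接回终点站，我相信这种情况应该存在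
--
--         for i,val in enumerate(jump): #遍历附近的公交站点
--             if cur_target>1:#至少得大于1，不然我自己走了还坐个屁公交
--                 if cur_target%val==0: #当前站能够坐公交
--                     mincost =min(mincost,cost[i]+findroute(cur_target//val)) #递归下一站
--                 else:
--                     bias = cur_target%val #当前站不能做公交看看需要走几步到达公交站
--                     if cur_target-bias>0: #往前走几步如果没到终点，就该坐公交，递归下一站
--                         mincost=min(mincost,bias*inc+cost[i]+findroute(cur_target//val))
--
--                     mincost = min(mincost,(val-bias)*dec+cost[i]+findroute(cur_target//val+1))#往后走几步坐公交递归下一站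
--         memo[cur_target]=mincost
--         return mincost
--
--     return findroute(target)%(1000000007)
-- ===== SOURCE B (Python) =====
-- def busRapidTransit(target, inc, dec, jump, cost):
--     # Two-phase iterative DP: collect the reachable states, then fill a table
--     # bottom-up in ascending order (every bus jump leads to a smaller state).
--     def children(t):
--         out = []
--         if t > 1:
--             for v in jump:
--                 q, r = divmod(t, v)
--                 if r == 0:
--                     out.append(q)
--                 else:
--                     if t - r > 0:
--                         out.append(q)
--                     out.append(q + 1)
--         return out
--
--     def collect(t, seen):
--         if t not in seen:
--             seen.add(t)
--             for c in children(t):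
--                 collect(c, seen)
--
--     seen = set()
--     collect(target, seen)
--
--     dp = {}
--     for t in sorted(seen):
--         best = 0 if t == 0 else t * inc
--         if t > 1:
--             for i, v in enumerate(jump):
--                 q, r = divmod(t, v)
--                 if r == 0:
--                     best = min(best, cost[i] + dp[q])
--                 else:
--                     if t - r > 0:
--                         best = min(best, r * inc + cost[i] + dp[q])
--                     best = min(best, (v - r) * dec + cost[i] + dp[q + 1])
--         dp[t] = best
--     return dp[target] % 1000000007
-- ===== Notes on version B (the rewrite author's own statement) =====
-- stated objective: alternative
-- what changed: Replaces A's memoized top-down recursion with a two-phase iterative DP: first collect the set of reachable states, then fill a table for them in ascending order, reading already-computed smaller states; same per-jump min logic, final modulo unchanged.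
import Mathlib
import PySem

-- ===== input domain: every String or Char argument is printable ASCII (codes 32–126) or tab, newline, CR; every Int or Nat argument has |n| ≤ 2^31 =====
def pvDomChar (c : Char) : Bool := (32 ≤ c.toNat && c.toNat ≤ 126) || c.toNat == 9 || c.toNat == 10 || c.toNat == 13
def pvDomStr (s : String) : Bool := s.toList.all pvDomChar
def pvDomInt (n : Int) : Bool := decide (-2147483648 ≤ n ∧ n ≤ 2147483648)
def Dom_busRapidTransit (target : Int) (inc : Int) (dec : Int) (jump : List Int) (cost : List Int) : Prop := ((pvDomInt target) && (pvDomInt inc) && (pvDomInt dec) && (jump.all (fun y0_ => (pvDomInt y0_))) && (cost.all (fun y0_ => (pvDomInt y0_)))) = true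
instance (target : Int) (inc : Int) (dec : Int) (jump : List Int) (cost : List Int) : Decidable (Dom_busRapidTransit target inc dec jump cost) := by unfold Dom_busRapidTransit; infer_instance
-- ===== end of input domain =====

-- B rebuilds A's memoized top-down recursion as a two-phase iterative DP (collect the
-- reachable states, then fill a table in ascending order); equal return values on Pre_.

-- ===== PORT A =====
-- A's `findroute` with the memo dict threaded through; the `.toNat < .toNat` tests are
-- totality guards only (Python recurses unconditionally there; under Pre_ they always hold).
mutual
def pvFindA (inc dec : Int) (jump cost : List Int) (t : Int) (memo : PySem.Dict Int Int) : Int × PySem.Dict Int Int :=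
  if t = 0 then (0, memo)
  else
    match PySem.Dict.get? memo t with
    | some v => (v, memo)
    | none =>
      let r := pvLoopA inc dec jump cost t 0 jump (t * inc) memo
      (r.1, PySem.Dict.insert r.2 t r.1)
termination_by (t.toNat, jump.length + 1)

def pvLoopA (inc dec : Int) (jump cost : List Int) (t : Int) (i : Nat) (rest : List Int) (mincost : Int) (memo : PySem.Dict Int Int) : Int × PySem.Dict Int Int :=
  match rest with
  | [] => (mincost, memo)
  | val :: rest' =>
    if 1 < t then
      if PySem.Int.mod t val = 0 then
        let q := PySem.Int.floordiv t val
        if _h : q.toNat < t.toNat then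
          let rc := pvFindA inc dec jump cost q memo
          pvLoopA inc dec jump cost t (i + 1) rest' (min mincost (PySem.List.pyGetD cost (i : Int) 0 + rc.1)) rc.2
        else (0, memo)
      else
        let bias := PySem.Int.mod t val
        let q := PySem.Int.floordiv t val
        let s1 :=
          if 0 < t - bias then
            if _h : q.toNat < t.toNat then
              let rc := pvFindA inc dec jump cost q memo
              (min mincost (bias * inc + PySem.List.pyGetD cost (i : Int) 0 + rc.1), rc.2)
            else (0, memo)
          else (mincost, memo)
        if _h2 : (q + 1).toNat < t.toNat then
          let rc2 := pvFindA inc dec jump cost (q + 1) s1.2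
          pvLoopA inc dec jump cost t (i + 1) rest' (min s1.1 ((val - bias) * dec + PySem.List.pyGetD cost (i : Int) 0 + rc2.1)) rc2.2
        else (0, memo)
    else pvLoopA inc dec jump cost t (i + 1) rest' mincost memo
termination_by (t.toNat, rest.length)
end

def busRapidTransit (target : Int) (inc : Int) (dec : Int) (jump : List Int) (cost : List Int) : Int :=
  PySem.Int.mod (pvFindA inc dec jump cost target PySem.Dict.empty).1 1000000007

-- ===== PORT B =====
-- Source B's `children`
def pvChildrenB (jump : List Int) (t : Int) : List Int :=
  if 1 < t then
    jump.foldl (fun out v =>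
      let q := PySem.Int.floordiv t v
      let r := PySem.Int.mod t v
      out ++ (if r = 0 then [q] else (if 0 < t - r then [q] else []) ++ [q + 1])) []
  else []

-- Source B's `collect` (recursive DFS over the visited set); the `.toNat < .toNat` test is a
-- totality guard only (under Pre_ every child is smaller, and outside the guard the
-- skipped call would return `seen` unchanged anyway on the inputs Pre_ admits).
mutual
def pvCollectB (jump : List Int) (t : Int) (seen : PySem.Set Int) : PySem.Set Int :=
  if PySem.Set.contains seen t then seen
  else pvCollectLoopB jump t (pvChildrenB jump t) (PySem.Set.add seen t)
termination_by (t.toNat, (pvChildrenB jump t).length + 1)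

def pvCollectLoopB (jump : List Int) (t : Int) (cs : List Int) (seen : PySem.Set Int) : PySem.Set Int :=
  match cs with
  | [] => seen
  | c :: cs' =>
    let seen' := if _h : c.toNat < t.toNat then pvCollectB jump c seen else seen
    pvCollectLoopB jump t cs' seen'
termination_by (t.toNat, cs.length)
end

-- Source B's inner `for i, v in enumerate(jump)` loop of the table pass; Python's `dp[q]`
-- (KeyError when absent — only outside Pre_) is ported as a lookup with default 0.
def pvDpInnerB (inc dec : Int) (cost : List Int) (dp : PySem.Dict Int Int) (t : Int) (i : Nat) (rest : List Int) (best : Int) : Int :=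
  match rest with
  | [] => best
  | v :: rest' =>
    let q := PySem.Int.floordiv t v
    let r := PySem.Int.mod t v
    if r = 0 then
      pvDpInnerB inc dec cost dp t (i + 1) rest' (min best (PySem.List.pyGetD cost (i : Int) 0 + PySem.Dict.getD dp q 0))
    else
      let b1 := if 0 < t - r then min best (r * inc + PySem.List.pyGetD cost (i : Int) 0 + PySem.Dict.getD dp q 0) else best
      pvDpInnerB inc dec cost dp t (i + 1) rest' (min b1 ((v - r) * dec + PySem.List.pyGetD cost (i : Int) 0 + PySem.Dict.getD dp (q + 1) 0))

-- Source B's `for t in sorted(seen)` table pass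
def pvDpLoopB (inc dec : Int) (jump cost : List Int) (ts : List Int) (dp : PySem.Dict Int Int) : PySem.Dict Int Int :=
  match ts with
  | [] => dp
  | t :: ts' =>
    let best0 := if t = 0 then 0 else t * inc
    let best := if 1 < t then pvDpInnerB inc dec cost dp t 0 jump best0 else best0
    pvDpLoopB inc dec jump cost ts' (PySem.Dict.insert dp t best)

def busRapidTransit_alt (target : Int) (inc : Int) (dec : Int) (jump : List Int) (cost : List Int) : Int :=
  let seen := pvCollectB jump target PySem.Set.empty
  let dp := pvDpLoopB inc dec jump cost (PySem.List.sorted seen (fun x => x) false) PySem.Dict.empty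
  PySem.Int.mod (PySem.Dict.getD dp target 0) 1000000007

-- ===== PRECONDITION & SPEC =====
-- Pre_ admits exactly the inputs on which A returns: when target > 1, A raises
-- ZeroDivisionError if 0 ∈ jump, RecursionError (infinite recursion) if 1 ∈ jump, and
-- IndexError on cost[i] if cost is shorter than jump; for target ≤ 1 A always returns.
def Pre_busRapidTransit (target : Int) (inc : Int) (dec : Int) (jump : List Int) (cost : List Int) : Prop :=
  target ≤ 1 ∨ (jump.length ≤ cost.length ∧ ∀ v ∈ jump, v ≠ 0 ∧ v ≠ 1)
instance (target : Int) (inc : Int) (dec : Int) (jump : List Int) (cost : List Int) : Decidable (Pre_busRapidTransit target inc dec jump cost) := by unfold Pre_busRapidTransit; infer_instance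

def pvWitness_busRapidTransit : Int × Int × Int × List Int × List Int := (31, 5, 3, [6], [10])

def Spec_busRapidTransit (target : Int) (inc : Int) (dec : Int) (jump : List Int) (cost : List Int) (out : Int) : Prop := out = busRapidTransit_alt target inc dec jump cost
instance (target : Int) (inc : Int) (dec : Int) (jump : List Int) (cost : List Int) (out : Int) : Decidable (Spec_busRapidTransit target inc dec jump cost out) := by unfold Spec_busRapidTransit; infer_instance

-- ===== CLAIM (what is proved, stated in full; the proofs are below) =====
def Claim_equal_busRapidTransit : Prop := ∀ (target : Int) (inc : Int) (dec : Int) (jump : List Int) (cost : List Int), Dom_busRapidTransit target inc dec jump cost → Pre_busRapidTransit target inc dec jump cost → Spec_busRapidTransit target inc dec jump cost (busRapidTransit target inc dec jump cost)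

-- ===== LEMMAS AND PROOFS =====

-- the common memo-free recurrence both ports compute (proof-side only)
mutual
def pvF (inc dec : Int) (jump cost : List Int) (t : Int) : Int :=
  if t = 0 then 0 else pvFLoop inc dec jump cost t 0 jump (t * inc)
termination_by (t.toNat, jump.length + 1)

def pvFLoop (inc dec : Int) (jump cost : List Int) (t : Int) (i : Nat) (rest : List Int) (mincost : Int) : Int :=
  match rest with
  | [] => mincost
  | val :: rest' =>
    if 1 < t then
      if PySem.Int.mod t val = 0 then
        pvFLoop inc dec jump cost t (i + 1) rest'
          (min mincost (PySem.List.pyGetD cost (i : Int) 0 +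
            (if _h : (PySem.Int.floordiv t val).toNat < t.toNat then pvF inc dec jump cost (PySem.Int.floordiv t val) else 0)))
      else
        pvFLoop inc dec jump cost t (i + 1) rest'
          (min (if 0 < t - PySem.Int.mod t val then
                  min mincost (PySem.Int.mod t val * inc + PySem.List.pyGetD cost (i : Int) 0 +
                    (if _h : (PySem.Int.floordiv t val).toNat < t.toNat then pvF inc dec jump cost (PySem.Int.floordiv t val) else 0))
                else mincost)
            ((val - PySem.Int.mod t val) * dec + PySem.List.pyGetD cost (i : Int) 0 +
              (if _h : (PySem.Int.floordiv t val + 1).toNat < t.toNat then pvF inc dec jump cost (PySem.Int.floordiv t val + 1) else 0)))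
    else pvFLoop inc dec jump cost t (i + 1) rest' mincost
termination_by (t.toNat, rest.length)
end

lemma pvChildLt (v t : Int) (hv0 : v ≠ 0) (hv1 : v ≠ 1) (ht : 1 < t) :
    PySem.Int.floordiv t v < t ∧ (PySem.Int.mod t v ≠ 0 → PySem.Int.floordiv t v + 1 < t) := by
  have hkey := PySem.Int.floordiv_mul_add_mod t v
  rcases lt_trichotomy v 0 with hneg | hz | hpos
  · have hb := PySem.Int.mod_neg_bounds t hneg
    have hqneg : PySem.Int.floordiv t v < 0 := by
      by_contra hq
      push_neg at hq
      have h2 : PySem.Int.floordiv t v * v ≤ 0 :=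
        mul_nonpos_iff.mpr (Or.inl ⟨hq, hneg.le⟩)
      linarith [hb.2]
    exact ⟨by linarith, fun _ => by linarith⟩
  · exact absurd hz hv0
  · have hv2 : 2 ≤ v := by omega
    have hr0 : 0 ≤ PySem.Int.mod t v := PySem.Int.mod_nonneg t hpos
    have hrlt : PySem.Int.mod t v < v := PySem.Int.mod_lt t hpos
    have hq0 : 0 ≤ PySem.Int.floordiv t v := by
      by_contra hq
      push_neg at hq
      have h1 : PySem.Int.floordiv t v ≤ -1 := by omega
      have h2 : PySem.Int.floordiv t v * v ≤ -1 * v :=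
        mul_le_mul_of_nonneg_right h1 hpos.le
      linarith
    have h3 : PySem.Int.floordiv t v * 2 ≤ PySem.Int.floordiv t v * v :=
      mul_le_mul_of_nonneg_left hv2 hq0
    constructor
    · linarith
    · intro hne
      have h4 : 1 ≤ PySem.Int.mod t v := by omega
      linarith

-- ---------- A-side: the threaded memo computes pvF ----------

def pvGoodM (inc dec : Int) (jump cost : List Int) (memo : PySem.Dict Int Int) : Prop :=
  ∀ k v, PySem.Dict.get? memo k = some v → v = pvF inc dec jump cost k

lemma pvGoodM_empty (inc dec : Int) (jump cost : List Int) : pvGoodM inc dec jump cost PySem.Dict.empty := by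
  intro k v h
  rw [PySem.Dict.get?_empty] at h
  cases h

lemma pvGoodM_insert (inc dec : Int) (jump cost : List Int) (memo : PySem.Dict Int Int) (t x : Int)
    (hG : pvGoodM inc dec jump cost memo) (hx : x = pvF inc dec jump cost t) :
    pvGoodM inc dec jump cost (PySem.Dict.insert memo t x) := by
  intro k v hk
  rw [PySem.Dict.get?_insert] at hk
  by_cases hkt : k = t
  · rw [if_pos hkt] at hk
    cases hk
    rw [hx, hkt]
  · rw [if_neg hkt] at hk
    exact hG k v hk

lemma pvLoopA_le_one (inc dec : Int) (jump cost : List Int) (t : Int) (ht : ¬ 1 < t) :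
    ∀ (rest : List Int) (i : Nat) (mincost : Int) (memo : PySem.Dict Int Int),
      pvLoopA inc dec jump cost t i rest mincost memo = (mincost, memo) := by
  intro rest
  induction rest with
  | nil => intro i mincost memo; rw [pvLoopA]
  | cons val rest' ih =>
    intro i mincost memo
    rw [pvLoopA]
    simp only [if_neg ht]
    exact ih _ _ _

lemma pvFLoop_le_one (inc dec : Int) (jump cost : List Int) (t : Int) (ht : ¬ 1 < t) :
    ∀ (rest : List Int) (i : Nat) (mincost : Int),
      pvFLoop inc dec jump cost t i rest mincost = mincost := by
  intro rest
  induction rest with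
  | nil => intro i mincost; rw [pvFLoop]
  | cons val rest' ih =>
    intro i mincost
    rw [pvFLoop]
    simp only [if_neg ht]
    exact ih _ _

lemma pvF_small (inc dec : Int) (jump cost : List Int) (t : Int) (ht : ¬ 1 < t) :
    pvF inc dec jump cost t = if t = 0 then 0 else t * inc := by
  by_cases ht0 : t = 0
  · rw [pvF, if_pos ht0, if_pos ht0]
  · rw [pvF, if_neg ht0, if_neg ht0, pvFLoop_le_one inc dec jump cost t ht]

lemma pvLoopA_spec (inc dec : Int) (jump cost : List Int) (t : Int) (ht : 1 < t)
    (IH : ∀ t' memo', t'.toNat < t.toNat → pvGoodM inc dec jump cost memo' →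
      (pvFindA inc dec jump cost t' memo').1 = pvF inc dec jump cost t' ∧
      pvGoodM inc dec jump cost (pvFindA inc dec jump cost t' memo').2) :
    ∀ (rest : List Int), (∀ v ∈ rest, v ≠ 0 ∧ v ≠ 1) →
    ∀ (i : Nat) (mincost : Int) (memo : PySem.Dict Int Int), pvGoodM inc dec jump cost memo →
      (pvLoopA inc dec jump cost t i rest mincost memo).1 = pvFLoop inc dec jump cost t i rest mincost ∧
      pvGoodM inc dec jump cost (pvLoopA inc dec jump cost t i rest mincost memo).2 := by
  intro rest
  induction rest with
  | nil =>
    intro _ i mincost memo hG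
    rw [pvLoopA, pvFLoop]
    exact ⟨rfl, hG⟩
  | cons val rest' ihrest =>
    intro hok i mincost memo hG
    obtain ⟨hv0, hv1⟩ := hok val (List.mem_cons_self ..)
    have hok' : ∀ v ∈ rest', v ≠ 0 ∧ v ≠ 1 := fun v hv => hok v (List.mem_cons_of_mem _ hv)
    have hch := pvChildLt val t hv0 hv1 ht
    have hqn : (PySem.Int.floordiv t val).toNat < t.toNat := by
      have := hch.1; omega
    rw [pvLoopA, pvFLoop]
    simp only [if_pos ht]
    by_cases hmod : PySem.Int.mod t val = 0
    · simp only [if_pos hmod, dif_pos hqn]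
      obtain ⟨h1, h2⟩ := IH _ memo hqn hG
      rw [h1]
      exact ihrest hok' _ _ _ h2
    · have hq1n : (PySem.Int.floordiv t val + 1).toNat < t.toNat := by
        have := hch.2 hmod; omega
      simp only [if_neg hmod, dif_pos hqn, dif_pos hq1n]
      by_cases hbias : 0 < t - PySem.Int.mod t val
      · simp only [if_pos hbias]
        obtain ⟨h1, h2⟩ := IH _ memo hqn hG
        obtain ⟨h3, h4⟩ := IH _ _ hq1n h2
        rw [h1, h3]
        exact ihrest hok' _ _ _ h4
      · simp only [if_neg hbias]
        obtain ⟨h3, h4⟩ := IH _ memo hq1n hG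
        rw [h3]
        exact ihrest hok' _ _ _ h4

lemma pvFindA_spec (inc dec : Int) (jump cost : List Int)
    (Hok : ∀ v ∈ jump, v ≠ 0 ∧ v ≠ 1) :
    ∀ (n : Nat) (t : Int) (memo : PySem.Dict Int Int), t.toNat ≤ n → pvGoodM inc dec jump cost memo →
      (pvFindA inc dec jump cost t memo).1 = pvF inc dec jump cost t ∧
      pvGoodM inc dec jump cost (pvFindA inc dec jump cost t memo).2 := by
  intro n
  induction n using Nat.strong_induction_on with
  | _ n IHn =>
    intro t memo hle hG
    rw [pvFindA]
    by_cases ht0 : t = 0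
    · simp only [if_pos ht0]
      refine ⟨?_, hG⟩
      rw [pvF, if_pos ht0]
    · have hpvF : pvF inc dec jump cost t = pvFLoop inc dec jump cost t 0 jump (t * inc) := by
        rw [pvF, if_neg ht0]
      simp only [if_neg ht0]
      cases hmem : PySem.Dict.get? memo t with
      | some v =>
        simp only []
        exact ⟨hG t v hmem, hG⟩
      | none =>
        simp only []
        by_cases ht : 1 < t
        · have IH' : ∀ t' memo', t'.toNat < t.toNat → pvGoodM inc dec jump cost memo' →
              (pvFindA inc dec jump cost t' memo').1 = pvF inc dec jump cost t' ∧
              pvGoodM inc dec jump cost (pvFindA inc dec jump cost t' memo').2 := by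
            intro t' memo' hlt hG'
            exact IHn t'.toNat (by omega) t' memo' le_rfl hG'
          obtain ⟨h1, h2⟩ := pvLoopA_spec inc dec jump cost t ht IH' jump Hok 0 (t * inc) memo hG
          constructor
          · rw [hpvF]
            exact h1
          · exact pvGoodM_insert inc dec jump cost _ t _ h2 (by rw [hpvF]; exact h1)
        · have hr := pvLoopA_le_one inc dec jump cost t ht jump 0 (t * inc) memo
          have hf : pvF inc dec jump cost t = t * inc := by
            rw [hpvF, pvFLoop_le_one inc dec jump cost t ht]
          rw [hr]
          exact ⟨hf.symm, pvGoodM_insert inc dec jump cost memo t _ hG hf.symm⟩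

lemma busA_eq (target inc dec : Int) (jump cost : List Int)
    (h : (∀ v ∈ jump, v ≠ 0 ∧ v ≠ 1) ∨ ¬ 1 < target) :
    busRapidTransit target inc dec jump cost = PySem.Int.mod (pvF inc dec jump cost target) 1000000007 := by
  rw [busRapidTransit]
  congr 1
  rcases h with Hok | ht
  · exact (pvFindA_spec inc dec jump cost Hok target.toNat target PySem.Dict.empty le_rfl
      (pvGoodM_empty inc dec jump cost)).1
  · rw [pvFindA]
    by_cases ht0 : target = 0
    · simp only [if_pos ht0]
      rw [pvF, if_pos ht0]
    · simp only [if_neg ht0, PySem.Dict.get?_empty]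
      rw [pvLoopA_le_one inc dec jump cost target ht]
      rw [pvF_small inc dec jump cost target ht, if_neg ht0]

-- ---------- B-side ----------

def pvG (t v : Int) : List Int :=
  if PySem.Int.mod t v = 0 then [PySem.Int.floordiv t v]
  else (if 0 < t - PySem.Int.mod t v then [PySem.Int.floordiv t v] else []) ++ [PySem.Int.floordiv t v + 1]

lemma pvChildrenB_eq (jump : List Int) (t : Int) (ht : 1 < t) :
    pvChildrenB jump t = jump.flatMap (pvG t) := by
  rw [pvChildrenB, if_pos ht]
  have h := PySem.List.foldl_append_eq_flatMap (pvG t) jump []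
  simp only [List.nil_append] at h
  rw [← h]
  simp only [pvG]

lemma pvChildren_lt (jump : List Int) (t : Int) (Hok : ∀ v ∈ jump, v ≠ 0 ∧ v ≠ 1) (ht : 1 < t) :
    ∀ c ∈ pvChildrenB jump t, c < t := by
  intro c hc
  rw [pvChildrenB_eq jump t ht] at hc
  obtain ⟨v, hv, hcg⟩ := List.mem_flatMap.mp hc
  obtain ⟨hv0, hv1⟩ := Hok v hv
  have hch := pvChildLt v t hv0 hv1 ht
  rw [pvG] at hcg
  by_cases hmod : PySem.Int.mod t v = 0
  · rw [if_pos hmod] at hcg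
    simp only [List.mem_singleton] at hcg
    omega
  · rw [if_neg hmod] at hcg
    have h2 := hch.2 hmod
    rcases List.mem_append.mp hcg with h | h
    · by_cases hb : 0 < t - PySem.Int.mod t v
      · rw [if_pos hb] at h
        simp only [List.mem_singleton] at h
        omega
      · rw [if_neg hb] at h
        simp at h
    · simp only [List.mem_singleton] at h
      omega

lemma pvCollectLoopB_mono (jump : List Int) (t : Int)
    (IH : ∀ (c : Int) (seen : PySem.Set Int), c.toNat < t.toNat → ∀ x ∈ seen, x ∈ pvCollectB jump c seen) :
    ∀ (cs : List Int) (seen : PySem.Set Int), ∀ x ∈ seen, x ∈ pvCollectLoopB jump t cs seen := by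
  intro cs
  induction cs with
  | nil => intro seen x hx; rw [pvCollectLoopB]; exact hx
  | cons c cs' ih =>
    intro seen x hx
    rw [pvCollectLoopB]
    by_cases h : c.toNat < t.toNat
    · simp only [dif_pos h]
      exact ih _ x (IH c seen h x hx)
    · simp only [dif_neg h]
      exact ih _ x hx

lemma pvCollectB_monoAux (jump : List Int) :
    ∀ (n : Nat) (t : Int) (seen : PySem.Set Int), t.toNat ≤ n → ∀ x ∈ seen, x ∈ pvCollectB jump t seen := by
  intro n
  induction n using Nat.strong_induction_on with
  | _ n IHn =>
    intro t seen hle x hx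
    rw [pvCollectB]
    by_cases hc : PySem.Set.contains seen t
    · rw [if_pos hc]; exact hx
    · rw [if_neg hc]
      refine pvCollectLoopB_mono jump t ?_ _ _ x ?_
      · intro c s hlt y hy
        exact IHn c.toNat (by omega) c s le_rfl y hy
      · exact (PySem.Set.mem_add seen t x).mpr (Or.inl hx)

lemma pvCollectB_mono (jump : List Int) (t : Int) (seen : PySem.Set Int) :
    ∀ x ∈ seen, x ∈ pvCollectB jump t seen :=
  pvCollectB_monoAux jump t.toNat t seen le_rfl

lemma pvCollectLoopB_mono' (jump : List Int) (t : Int) (cs : List Int) (seen : PySem.Set Int) :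
    ∀ x ∈ seen, x ∈ pvCollectLoopB jump t cs seen :=
  pvCollectLoopB_mono jump t (fun c s _ => pvCollectB_mono jump c s) cs seen

lemma pvCollectB_self (jump : List Int) (t : Int) (seen : PySem.Set Int) : t ∈ pvCollectB jump t seen := by
  rw [pvCollectB]
  by_cases hc : PySem.Set.contains seen t
  · rw [if_pos hc]
    exact (PySem.Set.contains_iff seen t).mp hc
  · rw [if_neg hc]
    exact pvCollectLoopB_mono' jump t _ _ t ((PySem.Set.mem_add seen t t).mpr (Or.inr rfl))

lemma pvCollectLoopB_nodup (jump : List Int) (t : Int)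
    (IH : ∀ (c : Int) (seen : PySem.Set Int), c.toNat < t.toNat → seen.Nodup → (pvCollectB jump c seen).Nodup) :
    ∀ (cs : List Int) (seen : PySem.Set Int), seen.Nodup → (pvCollectLoopB jump t cs seen).Nodup := by
  intro cs
  induction cs with
  | nil => intro seen h; rw [pvCollectLoopB]; exact h
  | cons c cs' ih =>
    intro seen h
    rw [pvCollectLoopB]
    by_cases hlt : c.toNat < t.toNat
    · simp only [dif_pos hlt]
      exact ih _ (IH c seen hlt h)
    · simp only [dif_neg hlt]
      exact ih _ h

lemma pvCollectB_nodupAux (jump : List Int) :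
    ∀ (n : Nat) (t : Int) (seen : PySem.Set Int), t.toNat ≤ n → seen.Nodup → (pvCollectB jump t seen).Nodup := by
  intro n
  induction n using Nat.strong_induction_on with
  | _ n IHn =>
    intro t seen hle h
    rw [pvCollectB]
    by_cases hc : PySem.Set.contains seen t
    · rw [if_pos hc]; exact h
    · rw [if_neg hc]
      refine pvCollectLoopB_nodup jump t ?_ _ _ (PySem.Set.nodup_add seen t h)
      intro c s hlt hs
      exact IHn c.toNat (by omega) c s le_rfl hs

def pvClosedIn (jump : List Int) (x : Int) (S : List Int) : Prop :=
  ∀ c ∈ pvChildrenB jump x, c.toNat < x.toNat → c ∈ S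

lemma pvCollectLoopB_closed (jump : List Int) (t : Int)
    (IHc : ∀ (c : Int) (seen : PySem.Set Int), c.toNat < t.toNat →
      ∀ x ∈ pvCollectB jump c seen, x ∈ seen ∨ pvClosedIn jump x (pvCollectB jump c seen)) :
    ∀ (cs : List Int) (seen : PySem.Set Int),
      (∀ x ∈ pvCollectLoopB jump t cs seen, x ∈ seen ∨ pvClosedIn jump x (pvCollectLoopB jump t cs seen)) ∧
      (∀ c ∈ cs, c.toNat < t.toNat → c ∈ pvCollectLoopB jump t cs seen) := by
  intro cs
  induction cs with
  | nil =>
    intro seen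
    constructor
    · intro x hx
      rw [pvCollectLoopB] at hx
      rw [pvCollectLoopB]
      exact Or.inl hx
    · intro c hc
      exact absurd hc (List.not_mem_nil)
  | cons c cs' ih =>
    intro seen
    by_cases h : c.toNat < t.toNat
    · have hres : pvCollectLoopB jump t (c :: cs') seen = pvCollectLoopB jump t cs' (pvCollectB jump c seen) := by
        rw [pvCollectLoopB]
        simp only [dif_pos h]
      constructor
      · intro x hx
        rw [hres] at hx
        rcases (ih (pvCollectB jump c seen)).1 x hx with h1 | h1
        · rcases IHc c seen h x h1 with h2 | h2
          · exact Or.inl h2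
          · refine Or.inr ?_
            intro d hd hdlt
            rw [hres]
            exact pvCollectLoopB_mono' jump t cs' _ d (h2 d hd hdlt)
        · refine Or.inr ?_
          intro d hd hdlt
          rw [hres]
          exact h1 d hd hdlt
      · intro d hd hdlt
        rw [hres]
        rcases List.mem_cons.mp hd with rfl | hd'
        · exact pvCollectLoopB_mono' jump t cs' _ d (pvCollectB_self jump d seen)
        · exact (ih (pvCollectB jump c seen)).2 d hd' hdlt
    · have hres : pvCollectLoopB jump t (c :: cs') seen = pvCollectLoopB jump t cs' seen := by
        rw [pvCollectLoopB]
        simp only [dif_neg h]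
      constructor
      · intro x hx
        rw [hres] at hx
        rcases (ih seen).1 x hx with h1 | h1
        · exact Or.inl h1
        · refine Or.inr ?_
          intro d hd hdlt
          rw [hres]
          exact h1 d hd hdlt
      · intro d hd hdlt
        rw [hres]
        rcases List.mem_cons.mp hd with rfl | hd'
        · exact absurd hdlt h
        · exact (ih seen).2 d hd' hdlt

lemma pvCollectB_closedAux (jump : List Int) :
    ∀ (n : Nat) (t : Int) (seen : PySem.Set Int), t.toNat ≤ n →
      ∀ x ∈ pvCollectB jump t seen, x ∈ seen ∨ pvClosedIn jump x (pvCollectB jump t seen) := by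
  intro n
  induction n using Nat.strong_induction_on with
  | _ n IHn =>
    intro t seen hle x hx
    rw [pvCollectB] at hx ⊢
    by_cases hc : PySem.Set.contains seen t
    · rw [if_pos hc] at hx ⊢
      exact Or.inl hx
    · rw [if_neg hc] at hx ⊢
      have IHc : ∀ (c : Int) (s : PySem.Set Int), c.toNat < t.toNat →
          ∀ y ∈ pvCollectB jump c s, y ∈ s ∨ pvClosedIn jump y (pvCollectB jump c s) := by
        intro c s hlt
        exact IHn c.toNat (by omega) c s le_rfl
      obtain ⟨ha, hb⟩ := pvCollectLoopB_closed jump t IHc (pvChildrenB jump t) (PySem.Set.add seen t)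
      rcases ha x hx with h1 | h1
      · rcases (PySem.Set.mem_add seen t x).mp h1 with h2 | rfl
        · exact Or.inl h2
        · exact Or.inr (fun d hd hdlt => hb d hd hdlt)
      · exact Or.inr h1

lemma pvCollectB_closed (jump : List Int) (target : Int) :
    ∀ x ∈ pvCollectB jump target PySem.Set.empty, pvClosedIn jump x (pvCollectB jump target PySem.Set.empty) := by
  intro x hx
  rcases pvCollectB_closedAux jump target.toNat target PySem.Set.empty le_rfl x hx with h | h
  · exact absurd h (List.not_mem_nil)
  · exact h

lemma pvDpInnerB_spec (inc dec : Int) (jump cost : List Int) (t : Int) (dp : PySem.Dict Int Int) (ht : 1 < t)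
    (hget : ∀ c ∈ pvChildrenB jump t, PySem.Dict.getD dp c 0 = pvF inc dec jump cost c ∧ c.toNat < t.toNat) :
    ∀ (rest : List Int), (∀ v ∈ rest, v ∈ jump) → ∀ (i : Nat) (best : Int),
      pvDpInnerB inc dec cost dp t i rest best = pvFLoop inc dec jump cost t i rest best := by
  intro rest
  induction rest with
  | nil => intro _ i best; rw [pvDpInnerB, pvFLoop]
  | cons v rest' ih =>
    intro hmem i best
    have hv : v ∈ jump := hmem v (List.mem_cons_self ..)
    have hmem' : ∀ w ∈ rest', w ∈ jump := fun w hw => hmem w (List.mem_cons_of_mem _ hw)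
    rw [pvDpInnerB, pvFLoop]
    simp only [if_pos ht]
    by_cases hmod : PySem.Int.mod t v = 0
    · have hqc : PySem.Int.floordiv t v ∈ pvChildrenB jump t := by
        rw [pvChildrenB_eq jump t ht]
        exact List.mem_flatMap.mpr ⟨v, hv, by
          rw [pvG, if_pos hmod]; exact List.mem_singleton.mpr rfl⟩
      obtain ⟨hgd, hlt⟩ := hget _ hqc
      simp only [if_pos hmod, hgd, dif_pos hlt]
      exact ih hmem' _ _
    · have hq1c : PySem.Int.floordiv t v + 1 ∈ pvChildrenB jump t := by
        rw [pvChildrenB_eq jump t ht]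
        refine List.mem_flatMap.mpr ⟨v, hv, ?_⟩
        rw [pvG, if_neg hmod]
        exact List.mem_append_right _ (List.mem_singleton.mpr rfl)
      obtain ⟨hgd1, hlt1⟩ := hget _ hq1c
      by_cases hbias : 0 < t - PySem.Int.mod t v
      · have hqc : PySem.Int.floordiv t v ∈ pvChildrenB jump t := by
          rw [pvChildrenB_eq jump t ht]
          refine List.mem_flatMap.mpr ⟨v, hv, ?_⟩
          rw [pvG, if_neg hmod]
          refine List.mem_append_left _ ?_
          rw [if_pos hbias]
          exact List.mem_singleton.mpr rfl
        obtain ⟨hgd, hlt⟩ := hget _ hqc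
        simp only [if_neg hmod, if_pos hbias, hgd, hgd1, dif_pos hlt, dif_pos hlt1]
        exact ih hmem' _ _
      · simp only [if_neg hmod, if_neg hbias, hgd1, dif_pos hlt1]
        exact ih hmem' _ _

lemma pvDpLoopB_spec (inc dec : Int) (jump cost : List Int) (S : List Int)
    (Hok : ∀ v ∈ jump, v ≠ 0 ∧ v ≠ 1)
    (hclosed : ∀ x ∈ S, pvClosedIn jump x S) :
    ∀ (rest : List Int) (dp : PySem.Dict Int Int),
      rest.Pairwise (· < ·) → (∀ s ∈ rest, s ∈ S) →
      (∀ s ∈ S, s ∉ rest → PySem.Dict.getD dp s 0 = pvF inc dec jump cost s) →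
      ∀ s ∈ S, PySem.Dict.getD (pvDpLoopB inc dec jump cost rest dp) s 0 = pvF inc dec jump cost s := by
  intro rest
  induction rest with
  | nil =>
    intro dp _ _ hInv s hs
    rw [pvDpLoopB]
    exact hInv s hs (List.not_mem_nil)
  | cons t rest' ih =>
    intro dp hPair hmem hInv s hs
    have htS : t ∈ S := hmem t (List.mem_cons_self ..)
    obtain ⟨hgt, hPair'⟩ := List.pairwise_cons.mp hPair
    have hbest : (if 1 < t then pvDpInnerB inc dec cost dp t 0 jump (if t = 0 then 0 else t * inc)
                  else (if t = 0 then 0 else t * inc)) = pvF inc dec jump cost t := by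
      by_cases ht : 1 < t
      · have ht0 : ¬ t = 0 := by omega
        rw [if_pos ht, if_neg ht0]
        have hget : ∀ c ∈ pvChildrenB jump t, PySem.Dict.getD dp c 0 = pvF inc dec jump cost c ∧ c.toNat < t.toNat := by
          intro c hc
          have hclt : c < t := pvChildren_lt jump t Hok ht c hc
          have hcn : c.toNat < t.toNat := by omega
          refine ⟨?_, hcn⟩
          have hcS : c ∈ S := hclosed t htS c hc hcn
          refine hInv c hcS ?_
          intro hcr
          rcases List.mem_cons.mp hcr with rfl | hcr'
          · omega
          · exact absurd (hgt c hcr') (by omega)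
        rw [pvDpInnerB_spec inc dec jump cost t dp ht hget jump (fun v hv => hv) 0 (t * inc)]
        rw [pvF, if_neg ht0]
      · rw [if_neg ht]
        rw [pvF_small inc dec jump cost t ht]
    rw [pvDpLoopB]
    simp only [hbest]
    refine ih (PySem.Dict.insert dp t (pvF inc dec jump cost t)) hPair'
      (fun s' hs' => hmem s' (List.mem_cons_of_mem _ hs')) ?_ s hs
    intro s' hs' hnot
    rw [PySem.Dict.getD_insert]
    by_cases hst : s' = t
    · rw [if_pos hst, hst]
    · rw [if_neg hst]
      refine hInv s' hs' ?_
      intro hc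
      rcases List.mem_cons.mp hc with rfl | hc'
      · exact hst rfl
      · exact hnot hc'

lemma busB_small (target inc dec : Int) (jump cost : List Int) (ht : ¬ 1 < target) :
    busRapidTransit_alt target inc dec jump cost =
      PySem.Int.mod (if target = 0 then 0 else target * inc) 1000000007 := by
  have hch : pvChildrenB jump target = [] := by rw [pvChildrenB, if_neg ht]
  have h0 : PySem.Set.contains (PySem.Set.empty : PySem.Set Int) target = false := rfl
  have hadd : PySem.Set.add (PySem.Set.empty : PySem.Set Int) target = [target] := by
    simp [PySem.Set.add, PySem.Set.empty, PySem.Set.contains]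
  have hcol : pvCollectB jump target PySem.Set.empty = [target] := by
    rw [pvCollectB, h0]
    simp only [Bool.false_eq_true, if_false]
    rw [hch, pvCollectLoopB, hadd]
  have hsort : PySem.List.sorted [target] (fun x => x) false = [target] :=
    PySem.List.sorted_eq_self_of_pairwise _ _ (List.pairwise_singleton _ _)
  simp only [busRapidTransit_alt, hcol, hsort]
  rw [pvDpLoopB]
  simp only [if_neg ht]
  rw [pvDpLoopB, PySem.Dict.getD_insert_self]

-- ===== VERDICT (by name: the statement is the Claim_ definition above) =====
theorem busRapidTransit_spec : Claim_equal_busRapidTransit := by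
  unfold Claim_equal_busRapidTransit
  intro target inc dec jump cost _ hPre
  unfold Spec_busRapidTransit
  rcases hPre with hsmall | ⟨_hlen, Hok⟩
  · have ht : ¬ 1 < target := by omega
    rw [busA_eq target inc dec jump cost (Or.inr ht), busB_small target inc dec jump cost ht]
    rw [pvF_small inc dec jump cost target ht]
  · by_cases ht : 1 < target
    · rw [busA_eq target inc dec jump cost (Or.inl Hok)]
      simp only [busRapidTransit_alt]
      congr 1
      have hNodup : (pvCollectB jump target PySem.Set.empty).Nodup :=
        pvCollectB_nodupAux jump target.toNat target _ le_rfl List.nodup_nil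
      have hclosed := pvCollectB_closed jump target
      have htmem : target ∈ pvCollectB jump target PySem.Set.empty := pvCollectB_self jump target _
      have hperm : (PySem.List.sorted (pvCollectB jump target PySem.Set.empty) (fun x => x) false).Perm
          (pvCollectB jump target PySem.Set.empty) :=
        PySem.List.sorted_perm _ _ false
      have hple : (PySem.List.sorted (pvCollectB jump target PySem.Set.empty) (fun x => x) false).Pairwise
          (fun a b => a ≤ b) := PySem.List.sorted_pairwise _ _
      have hLnodup : (PySem.List.sorted (pvCollectB jump target PySem.Set.empty) (fun x => x) false).Nodup :=
        hperm.nodup_iff.mpr hNodup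
      have hplt : (PySem.List.sorted (pvCollectB jump target PySem.Set.empty) (fun x => x) false).Pairwise
          (· < ·) := by
        have hand := List.Pairwise.and hple hLnodup
        exact hand.imp (fun h => lt_of_le_of_ne h.1 h.2)
      refine (pvDpLoopB_spec inc dec jump cost _ Hok hclosed _ PySem.Dict.empty hplt
        (fun s hs => hperm.subset hs) ?_ target htmem).symm
      intro s hs hns
      exact absurd (hperm.mem_iff.mpr hs) hns
    · rw [busA_eq target inc dec jump cost (Or.inr ht), busB_small target inc dec jump cost ht]
      rw [pvF_small inc dec jump cost target ht]
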